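-- pv_equiv track=rewrite | github.com/zactodd/ProjectEuler | Answers/answer089.py | roman_numeral_len
-- ===== SOURCE A (Python) =====
-- LENGTHS = [0, 1, 2, 3, 2, 1, 2, 3, 4, 2]
--
-- def roman_numeral_len(n):
--     assert 1 < n < 5000
--     l = 0
--     if n >= 4000:
--         l += 2
--     while n > 0:
--         l += LENGTHS[n % 10]
--         n //= 10
--     return l
-- ===== SOURCE B (Python) =====
-- def roman_numeral_len(n):
--     assert 1 < n < 5000
--     table = [(1000, 'M'), (900, 'CM'), (500, 'D'), (400, 'CD'),
--              (100, 'C'), (90, 'XC'), (50, 'L'), (40, 'XL'),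
--              (10, 'X'), (9, 'IX'), (5, 'V'), (4, 'IV'), (1, 'I')]
--     res = ''
--     while n > 0:
--         for v, s in table:
--             if v <= n:
--                 res += s
--                 n -= v
--                 break
--     return len(res)
-- ===== Notes on version B (the rewrite author's own statement) =====
-- stated objective: idiomatic
-- what changed: replaces the per-decimal-digit length lookup table plus its ad-hoc adjustment for the top thousands range by the standard greedy subtractive Roman-numeral construction, returning the length of the numeral it builds
import Mathlib
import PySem

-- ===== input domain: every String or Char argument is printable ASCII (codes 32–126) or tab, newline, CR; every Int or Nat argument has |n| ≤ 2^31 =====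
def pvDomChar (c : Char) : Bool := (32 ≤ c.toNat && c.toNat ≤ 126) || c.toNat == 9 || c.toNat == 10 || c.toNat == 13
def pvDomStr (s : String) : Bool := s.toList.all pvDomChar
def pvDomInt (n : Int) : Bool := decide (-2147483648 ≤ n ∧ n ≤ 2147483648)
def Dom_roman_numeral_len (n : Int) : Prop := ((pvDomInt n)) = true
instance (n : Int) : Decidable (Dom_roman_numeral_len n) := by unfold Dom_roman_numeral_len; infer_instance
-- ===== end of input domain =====

-- B replaces A's per-decimal-digit length table and its top-range fix-up by the standard greedy Roman-numeral construction (idiomatic).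

-- ===== PORT A =====
def pvLengths : List Int := [0, 1, 2, 3, 2, 1, 2, 3, 4, 2]

-- 'while n > 0: l += LENGTHS[n % 10]; n //= 10' — fuel (n.toNat + 1 at the call) only bounds the iteration count
def pvALoop : Nat → Int → Int → Int
  | 0, _, l => l
  | fuel + 1, n, l =>
    if n > 0 then
      pvALoop fuel (PySem.Int.floordiv n 10)
        (l + (PySem.List.pyGet? pvLengths (PySem.Int.mod n 10)).getD 0)
    else l

def roman_numeral_len (n : Int) : Int :=
  let l : Int := 0
  let l := if n ≥ 4000 then l + 2 else l
  pvALoop (n.toNat + 1) n l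

-- ===== PORT B =====
-- table of (value, symbol) pairs; symbols as List Char (the PySem string convention)
def pvTable : List (Int × List Char) :=
  [(1000, ['M']), (900, ['C','M']), (500, ['D']), (400, ['C','D']),
   (100, ['C']), (90, ['X','C']), (50, ['L']), (40, ['X','L']),
   (10, ['X']), (9, ['I','X']), (5, ['V']), (4, ['I','V']), (1, ['I'])]

-- 'while n > 0: for v, s in table: if v <= n: res += s; n -= v; break' — fuel (n.toNat + 1 at the call) only bounds the iteration count
def pvGreedy : Nat → Int → List Char → List Char
  | 0, _, res => res
  | fuel + 1, n, res =>
    if n > 0 then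
      match pvTable.find? (fun p => decide (p.1 ≤ n)) with
      | some (v, s) => pvGreedy fuel (n - v) (res ++ s)
      | none => res
    else res

def roman_numeral_len_alt (n : Int) : Int :=
  ((pvGreedy (n.toNat + 1) n []).length : Int)

-- ===== PRECONDITION & SPEC =====
-- exactly A's 'assert 1 < n < 5000' (A raises AssertionError outside it)
def Pre_roman_numeral_len (n : Int) : Prop := 1 < n ∧ n < 5000
instance (n : Int) : Decidable (Pre_roman_numeral_len n) := by unfold Pre_roman_numeral_len; infer_instance
def pvWitness_roman_numeral_len : Int := 2024

def Spec_roman_numeral_len (n : Int) (out : Int) : Prop := out = roman_numeral_len_alt n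
instance (n : Int) (out : Int) : Decidable (Spec_roman_numeral_len n out) := by unfold Spec_roman_numeral_len; infer_instance

-- ===== CLAIM (what is proved, stated in full; the proofs are below) =====
def Claim_equal_roman_numeral_len : Prop := ∀ (n : Int), Dom_roman_numeral_len n → Pre_roman_numeral_len n → Spec_roman_numeral_len n (roman_numeral_len n)

-- ===== LEMMAS AND PROOFS =====
theorem pvGE (a b : Int) : b ≤ a ∨ a < b := by omega
theorem pvLT (a b : Int) : a < b ∨ b ≤ a := by omega

-- digit length lookup, as A performs it
def pvL (r : Int) : Int := (PySem.List.pyGet? pvLengths r).getD 0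

-- the sum A's while-loop accumulates
def pvS (n : Int) : Int :=
  if 0 < n then pvL ((n % 10)) + pvS ((n / 10)) else 0
termination_by n.toNat
decreasing_by omega

theorem pvS_pos (n : Int) (h : 0 < n) :
    pvS n = pvL ((n % 10)) + pvS ((n / 10)) := by
  rw [pvS]; simp [h]

theorem pvS_nonpos (n : Int) (h : ¬ 0 < n) : pvS n = 0 := by
  rw [pvS]; simp [h]

theorem pvL0 : pvL 0 = 0 := by decide
theorem pvL1 : pvL 1 = 1 := by decide
theorem pvL2 : pvL 2 = 2 := by decide
theorem pvL3 : pvL 3 = 3 := by decide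
theorem pvL4 : pvL 4 = 2 := by decide
theorem pvL5 : pvL 5 = 1 := by decide
theorem pvL6 : pvL 6 = 2 := by decide
theorem pvL7 : pvL 7 = 3 := by decide
theorem pvL8 : pvL 8 = 4 := by decide
theorem pvL9 : pvL 9 = 2 := by decide

-- pvS as a sum over the four decimal digits
theorem pvS_digits (n : Int) (h0 : 0 ≤ n) (h1 : n < 10000) :
    pvS n = pvL ((n / 1000)) + pvL ((n / 100 % 10))
      + pvL ((n / 10 % 10)) + pvL ((n % 10)) := by
  rcases pvLT n 1 with hc | hc
  · have hn : n = 0 := by omega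
    subst hn
    simp [pvS_nonpos 0 (by omega), pvL0]
  rcases pvLT n 10 with hc2 | hc2
  · rw [pvS_pos n (by omega), pvS_nonpos ((n / 10)) (by omega)]
    have e1 : (n / 1000) = 0 := by omega
    have e2 : (n / 100 % 10) = 0 := by omega
    have e3 : (n / 10 % 10) = 0 := by omega
    rw [e1, e2, e3, pvL0]; ring
  rcases pvLT n 100 with hc3 | hc3
  · rw [pvS_pos n (by omega), pvS_pos ((n / 10)) (by omega),
      pvS_nonpos ((n / 10 / 10)) (by omega)]
    have e1 : (n / 1000) = 0 := by omega
    have e2 : (n / 100 % 10) = 0 := by omega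
    rw [e1, e2, pvL0]; ring
  rcases pvLT n 1000 with hc4 | hc4
  · rw [pvS_pos n (by omega), pvS_pos ((n / 10)) (by omega),
      pvS_pos ((n / 10 / 10)) (by omega),
      pvS_nonpos ((n / 10 / 10 / 10)) (by omega)]
    have e1 : (n / 1000) = 0 := by omega
    have e2 : (n / 10 / 10) = (n / 100) := by omega
    rw [e2]
    have e3 : (n / 100 % 10) = (n / 100) := by omega
    rw [e1, e3, pvL0]; ring
  · rw [pvS_pos n (by omega), pvS_pos ((n / 10)) (by omega),
      pvS_pos ((n / 10 / 10)) (by omega),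
      pvS_pos ((n / 10 / 10 / 10)) (by omega)]
    have e2 : (n / 10 / 10) = (n / 100) := by omega
    rw [e2]
    have e3 : (n / 100 / 10) = (n / 1000) := by omega
    rw [e3, pvS_nonpos ((n / 1000 / 10)) (by omega)]
    have e4 : (n / 1000 % 10) = (n / 1000) := by omega
    rw [e4]; ring

-- A's loop computes l + pvS n (given enough fuel)
theorem pvALoop_eq (f : Nat) : ∀ n l : Int, n.toNat < f → pvALoop f n l = l + pvS n := by
  induction f with
  | zero => intro n l h; omega
  | succ f ih =>
    intro n l h
    by_cases hn : n > 0
    · rw [pvALoop, if_pos hn,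
        PySem.Int.floordiv_eq_ediv_of_pos (a := n) (by norm_num),
        PySem.Int.mod_eq_emod_of_pos (a := n) (by norm_num)]
      rw [ih ((n / 10)) _ (by omega)]
      rw [pvS_pos n hn]
      show l + pvL ((n % 10)) + pvS ((n / 10)) = _
      ring
    · rw [pvALoop, if_neg hn, pvS_nonpos n hn]; ring

-- the target value both programs compute
def pvT (n : Int) : Int := (if 4000 ≤ n then 2 else 0) + pvS n

-- B's greedy loop computes res.length + pvT n (given enough fuel), for 0 ≤ n < 5000
theorem pvGreedy_eq (f : Nat) : ∀ (n : Int) (res : List Char), 0 ≤ n → n < 5000 → n.toNat < f →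
    ((pvGreedy f n res).length : Int) = (res.length : Int) + pvT n := by
  induction f with
  | zero => intro n res h0 h5 h; omega
  | succ f ih =>
    intro n res h0 h5 hf
    by_cases hn : n > 0
    case neg =>
      rw [pvGreedy, if_neg hn]
      simp [pvT, pvS_nonpos n hn, show ¬ (4000:Int) ≤ n by omega]
    case pos =>
    rcases pvGE n 1000 with hb | hb
    case inl => -- v = 1000, 'M'
      have hfind : pvTable.find? (fun p => decide (p.1 ≤ n)) = some (1000, ['M']) := by
        simp [pvTable, List.find?, show (1000:Int) ≤ n from hb]
      rw [pvGreedy, if_pos hn, hfind]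
      rw [ih (n - 1000) (res ++ ['M']) (by omega) (by omega) (by omega)]
      simp only [List.length_append, List.length_cons, List.length_nil]
      unfold pvT
      rw [pvS_digits n (by omega) (by omega), pvS_digits (n - 1000) (by omega) (by omega)]
      have d1 : ((n - 1000) / 1000) = (n / 1000) - 1 := by omega
      have d2 : ((n - 1000) / 100 % 10) = (n / 100 % 10) := by omega
      have d3 : ((n - 1000) / 10 % 10) = (n / 10 % 10) := by omega
      have d4 : ((n - 1000) % 10) = (n % 10) := by omega
      rw [d1, d2, d3, d4]
      have ha : (n / 1000) = 1 ∨ (n / 1000) = 2 ∨ (n / 1000) = 3 ∨ (n / 1000) = 4 := by omega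
      rcases ha with ha | ha | ha | ha <;>
        rw [ha] <;>
        simp [show ((4000:Int) ≤ n) ↔ (n / 1000) = 4 from by omega, ha,
          show ¬ (4000:Int) ≤ n - 1000 from by omega, pvL0, pvL1, pvL2, pvL3, pvL4] <;>
        push_cast <;> ring
    case inr =>
    rcases pvGE n 900 with hb2 | hb2
    case inl => -- v = 900, 'CM'
      have hfind : pvTable.find? (fun p => decide (p.1 ≤ n)) = some (900, ['C','M']) := by
        simp [pvTable, List.find?, show ¬ (1000:Int) ≤ n from by omega, show (900:Int) ≤ n from hb2]
      rw [pvGreedy, if_pos hn, hfind]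
      rw [ih (n - 900) (res ++ ['C','M']) (by omega) (by omega) (by omega)]
      simp only [List.length_append, List.length_cons, List.length_nil]
      unfold pvT
      rw [pvS_digits n (by omega) (by omega), pvS_digits (n - 900) (by omega) (by omega)]
      have d1 : ((n - 900) / 1000) = 0 := by omega
      have d1' : (n / 1000) = 0 := by omega
      have d2 : ((n - 900) / 100 % 10) = 0 := by omega
      have d2' : (n / 100 % 10) = 9 := by omega
      have d3 : ((n - 900) / 10 % 10) = (n / 10 % 10) := by omega
      have d4 : ((n - 900) % 10) = (n % 10) := by omega
      rw [d1, d1', d2, d2', d3, d4, pvL0, pvL9]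
      simp [show ¬ (4000:Int) ≤ n from by omega, show ¬ (4000:Int) ≤ n - 900 from by omega]
      push_cast; ring
    case inr =>
    rcases pvGE n 500 with hb3 | hb3
    case inl => -- v = 500, 'D'
      have hfind : pvTable.find? (fun p => decide (p.1 ≤ n)) = some (500, ['D']) := by
        simp [pvTable, List.find?, show ¬ (1000:Int) ≤ n from by omega,
          show ¬ (900:Int) ≤ n from by omega, show (500:Int) ≤ n from hb3]
      rw [pvGreedy, if_pos hn, hfind]
      rw [ih (n - 500) (res ++ ['D']) (by omega) (by omega) (by omega)]
      simp only [List.length_append, List.length_cons, List.length_nil]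
      unfold pvT
      rw [pvS_digits n (by omega) (by omega), pvS_digits (n - 500) (by omega) (by omega)]
      have d1 : ((n - 500) / 1000) = 0 := by omega
      have d1' : (n / 1000) = 0 := by omega
      have d2 : ((n - 500) / 100 % 10) = (n / 100 % 10) - 5 := by omega
      have d3 : ((n - 500) / 10 % 10) = (n / 10 % 10) := by omega
      have d4 : ((n - 500) % 10) = (n % 10) := by omega
      rw [d1, d1', d2, d3, d4, pvL0]
      have hh : (n / 100 % 10) = 5 ∨ (n / 100 % 10) = 6 ∨
          (n / 100 % 10) = 7 ∨ (n / 100 % 10) = 8 := by omega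
      rcases hh with hh | hh | hh | hh <;>
        rw [hh] <;>
        simp [show ¬ (4000:Int) ≤ n from by omega, show ¬ (4000:Int) ≤ n - 500 from by omega,
          pvL0, pvL1, pvL2, pvL3, pvL5, pvL6, pvL7, pvL8] <;>
        push_cast <;> ring
    case inr =>
    rcases pvGE n 400 with hb4 | hb4
    case inl => -- v = 400, 'CD'
      have hfind : pvTable.find? (fun p => decide (p.1 ≤ n)) = some (400, ['C','D']) := by
        simp [pvTable, List.find?, show ¬ (1000:Int) ≤ n from by omega,
          show ¬ (900:Int) ≤ n from by omega, show ¬ (500:Int) ≤ n from by omega,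
          show (400:Int) ≤ n from hb4]
      rw [pvGreedy, if_pos hn, hfind]
      rw [ih (n - 400) (res ++ ['C','D']) (by omega) (by omega) (by omega)]
      simp only [List.length_append, List.length_cons, List.length_nil]
      unfold pvT
      rw [pvS_digits n (by omega) (by omega), pvS_digits (n - 400) (by omega) (by omega)]
      have d1 : ((n - 400) / 1000) = 0 := by omega
      have d1' : (n / 1000) = 0 := by omega
      have d2 : ((n - 400) / 100 % 10) = 0 := by omega
      have d2' : (n / 100 % 10) = 4 := by omega
      have d3 : ((n - 400) / 10 % 10) = (n / 10 % 10) := by omega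
      have d4 : ((n - 400) % 10) = (n % 10) := by omega
      rw [d1, d1', d2, d2', d3, d4, pvL0, pvL4]
      simp [show ¬ (4000:Int) ≤ n from by omega, show ¬ (4000:Int) ≤ n - 400 from by omega]
      push_cast; ring
    case inr =>
    rcases pvGE n 100 with hb5 | hb5
    case inl => -- v = 100, 'C'
      have hfind : pvTable.find? (fun p => decide (p.1 ≤ n)) = some (100, ['C']) := by
        simp [pvTable, List.find?, show ¬ (1000:Int) ≤ n from by omega,
          show ¬ (900:Int) ≤ n from by omega, show ¬ (500:Int) ≤ n from by omega,
          show ¬ (400:Int) ≤ n from by omega, show (100:Int) ≤ n from hb5]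
      rw [pvGreedy, if_pos hn, hfind]
      rw [ih (n - 100) (res ++ ['C']) (by omega) (by omega) (by omega)]
      simp only [List.length_append, List.length_cons, List.length_nil]
      unfold pvT
      rw [pvS_digits n (by omega) (by omega), pvS_digits (n - 100) (by omega) (by omega)]
      have d1 : ((n - 100) / 1000) = 0 := by omega
      have d1' : (n / 1000) = 0 := by omega
      have d2 : ((n - 100) / 100 % 10) = (n / 100 % 10) - 1 := by omega
      have d3 : ((n - 100) / 10 % 10) = (n / 10 % 10) := by omega
      have d4 : ((n - 100) % 10) = (n % 10) := by omega
      rw [d1, d1', d2, d3, d4, pvL0]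
      have hh : (n / 100 % 10) = 1 ∨ (n / 100 % 10) = 2 ∨
          (n / 100 % 10) = 3 := by omega
      rcases hh with hh | hh | hh <;>
        rw [hh] <;>
        simp [show ¬ (4000:Int) ≤ n from by omega, show ¬ (4000:Int) ≤ n - 100 from by omega,
          pvL0, pvL1, pvL2, pvL3] <;>
        push_cast <;> ring
    case inr =>
    rcases pvGE n 90 with hb6 | hb6
    case inl => -- v = 90, 'XC'
      have hfind : pvTable.find? (fun p => decide (p.1 ≤ n)) = some (90, ['X','C']) := by
        simp [pvTable, List.find?, show ¬ (1000:Int) ≤ n from by omega,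
          show ¬ (900:Int) ≤ n from by omega, show ¬ (500:Int) ≤ n from by omega,
          show ¬ (400:Int) ≤ n from by omega, show ¬ (100:Int) ≤ n from by omega,
          show (90:Int) ≤ n from hb6]
      rw [pvGreedy, if_pos hn, hfind]
      rw [ih (n - 90) (res ++ ['X','C']) (by omega) (by omega) (by omega)]
      simp only [List.length_append, List.length_cons, List.length_nil]
      unfold pvT
      rw [pvS_digits n (by omega) (by omega), pvS_digits (n - 90) (by omega) (by omega)]
      have d1 : ((n - 90) / 1000) = 0 := by omega
      have d1' : (n / 1000) = 0 := by omega
      have d2 : ((n - 90) / 100 % 10) = 0 := by omega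
      have d2' : (n / 100 % 10) = 0 := by omega
      have d3 : ((n - 90) / 10 % 10) = 0 := by omega
      have d3' : (n / 10 % 10) = 9 := by omega
      have d4 : ((n - 90) % 10) = (n % 10) := by omega
      rw [d1, d1', d2, d2', d3, d3', d4, pvL0, pvL9]
      simp [show ¬ (4000:Int) ≤ n from by omega, show ¬ (4000:Int) ≤ n - 90 from by omega]
      push_cast; ring
    case inr =>
    rcases pvGE n 50 with hb7 | hb7
    case inl => -- v = 50, 'L'
      have hfind : pvTable.find? (fun p => decide (p.1 ≤ n)) = some (50, ['L']) := by
        simp [pvTable, List.find?, show ¬ (1000:Int) ≤ n from by omega,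
          show ¬ (900:Int) ≤ n from by omega, show ¬ (500:Int) ≤ n from by omega,
          show ¬ (400:Int) ≤ n from by omega, show ¬ (100:Int) ≤ n from by omega,
          show ¬ (90:Int) ≤ n from by omega, show (50:Int) ≤ n from hb7]
      rw [pvGreedy, if_pos hn, hfind]
      rw [ih (n - 50) (res ++ ['L']) (by omega) (by omega) (by omega)]
      simp only [List.length_append, List.length_cons, List.length_nil]
      unfold pvT
      rw [pvS_digits n (by omega) (by omega), pvS_digits (n - 50) (by omega) (by omega)]
      have d1 : ((n - 50) / 1000) = 0 := by omega
      have d1' : (n / 1000) = 0 := by omega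
      have d2 : ((n - 50) / 100 % 10) = 0 := by omega
      have d2' : (n / 100 % 10) = 0 := by omega
      have d3 : ((n - 50) / 10 % 10) = (n / 10 % 10) - 5 := by omega
      have d4 : ((n - 50) % 10) = (n % 10) := by omega
      rw [d1, d1', d2, d2', d3, d4, pvL0]
      have hh : (n / 10 % 10) = 5 ∨ (n / 10 % 10) = 6 ∨
          (n / 10 % 10) = 7 ∨ (n / 10 % 10) = 8 := by omega
      rcases hh with hh | hh | hh | hh <;>
        rw [hh] <;>
        simp [show ¬ (4000:Int) ≤ n from by omega, show ¬ (4000:Int) ≤ n - 50 from by omega,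
          pvL0, pvL1, pvL2, pvL3, pvL5, pvL6, pvL7, pvL8] <;>
        push_cast <;> ring
    case inr =>
    rcases pvGE n 40 with hb8 | hb8
    case inl => -- v = 40, 'XL'
      have hfind : pvTable.find? (fun p => decide (p.1 ≤ n)) = some (40, ['X','L']) := by
        simp [pvTable, List.find?, show ¬ (1000:Int) ≤ n from by omega,
          show ¬ (900:Int) ≤ n from by omega, show ¬ (500:Int) ≤ n from by omega,
          show ¬ (400:Int) ≤ n from by omega, show ¬ (100:Int) ≤ n from by omega,
          show ¬ (90:Int) ≤ n from by omega, show ¬ (50:Int) ≤ n from by omega,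
          show (40:Int) ≤ n from hb8]
      rw [pvGreedy, if_pos hn, hfind]
      rw [ih (n - 40) (res ++ ['X','L']) (by omega) (by omega) (by omega)]
      simp only [List.length_append, List.length_cons, List.length_nil]
      unfold pvT
      rw [pvS_digits n (by omega) (by omega), pvS_digits (n - 40) (by omega) (by omega)]
      have d1 : ((n - 40) / 1000) = 0 := by omega
      have d1' : (n / 1000) = 0 := by omega
      have d2 : ((n - 40) / 100 % 10) = 0 := by omega
      have d2' : (n / 100 % 10) = 0 := by omega
      have d3 : ((n - 40) / 10 % 10) = 0 := by omega
      have d3' : (n / 10 % 10) = 4 := by omega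
      have d4 : ((n - 40) % 10) = (n % 10) := by omega
      rw [d1, d1', d2, d2', d3, d3', d4, pvL0, pvL4]
      simp [show ¬ (4000:Int) ≤ n from by omega, show ¬ (4000:Int) ≤ n - 40 from by omega]
      push_cast; ring
    case inr =>
    rcases pvGE n 10 with hb9 | hb9
    case inl => -- v = 10, 'X'
      have hfind : pvTable.find? (fun p => decide (p.1 ≤ n)) = some (10, ['X']) := by
        simp [pvTable, List.find?, show ¬ (1000:Int) ≤ n from by omega,
          show ¬ (900:Int) ≤ n from by omega, show ¬ (500:Int) ≤ n from by omega,
          show ¬ (400:Int) ≤ n from by omega, show ¬ (100:Int) ≤ n from by omega,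
          show ¬ (90:Int) ≤ n from by omega, show ¬ (50:Int) ≤ n from by omega,
          show ¬ (40:Int) ≤ n from by omega, show (10:Int) ≤ n from hb9]
      rw [pvGreedy, if_pos hn, hfind]
      rw [ih (n - 10) (res ++ ['X']) (by omega) (by omega) (by omega)]
      simp only [List.length_append, List.length_cons, List.length_nil]
      unfold pvT
      rw [pvS_digits n (by omega) (by omega), pvS_digits (n - 10) (by omega) (by omega)]
      have d1 : ((n - 10) / 1000) = 0 := by omega
      have d1' : (n / 1000) = 0 := by omega
      have d2 : ((n - 10) / 100 % 10) = 0 := by omega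
      have d2' : (n / 100 % 10) = 0 := by omega
      have d3 : ((n - 10) / 10 % 10) = (n / 10 % 10) - 1 := by omega
      have d4 : ((n - 10) % 10) = (n % 10) := by omega
      rw [d1, d1', d2, d2', d3, d4, pvL0]
      have hh : (n / 10 % 10) = 1 ∨ (n / 10 % 10) = 2 ∨
          (n / 10 % 10) = 3 := by omega
      rcases hh with hh | hh | hh <;>
        rw [hh] <;>
        simp [show ¬ (4000:Int) ≤ n from by omega, show ¬ (4000:Int) ≤ n - 10 from by omega,
          pvL0, pvL1, pvL2, pvL3] <;>
        push_cast <;> ring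
    case inr =>
    rcases pvGE n 9 with hb10 | hb10
    case inl => -- v = 9, 'IX' (n = 9)
      have hn9 : n = 9 := by omega
      subst hn9
      have hfind : pvTable.find? (fun p => decide (p.1 ≤ (9:Int))) = some (9, ['I','X']) := by
        decide
      rw [pvGreedy, if_pos hn, hfind]
      show ((pvGreedy f ((9:Int) - 9) (res ++ ['I','X'])).length : Int) = (res.length : Int) + pvT 9
      rw [show (9:Int) - 9 = 0 from by norm_num,
        ih 0 (res ++ ['I','X']) (by omega) (by omega) (by omega)]
      simp only [List.length_append, List.length_cons, List.length_nil]
      show _ = (res.length : Int) + pvT 9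
      unfold pvT
      rw [pvS_nonpos 0 (by omega), pvS_pos 9 (by omega),
        pvS_nonpos ((9 / 10)) (by omega)]
      norm_num [pvL9]
    case inr =>
    rcases pvGE n 5 with hb11 | hb11
    case inl => -- v = 5, 'V'
      have hfind : pvTable.find? (fun p => decide (p.1 ≤ n)) = some (5, ['V']) := by
        simp [pvTable, List.find?, show ¬ (1000:Int) ≤ n from by omega,
          show ¬ (900:Int) ≤ n from by omega, show ¬ (500:Int) ≤ n from by omega,
          show ¬ (400:Int) ≤ n from by omega, show ¬ (100:Int) ≤ n from by omega,
          show ¬ (90:Int) ≤ n from by omega, show ¬ (50:Int) ≤ n from by omega,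
          show ¬ (40:Int) ≤ n from by omega, show ¬ (10:Int) ≤ n from by omega,
          show ¬ (9:Int) ≤ n from by omega, show (5:Int) ≤ n from hb11]
      rw [pvGreedy, if_pos hn, hfind]
      rw [ih (n - 5) (res ++ ['V']) (by omega) (by omega) (by omega)]
      simp only [List.length_append, List.length_cons, List.length_nil]
      unfold pvT
      rw [pvS_digits n (by omega) (by omega), pvS_digits (n - 5) (by omega) (by omega)]
      have d1 : ((n - 5) / 1000) = 0 := by omega
      have d1' : (n / 1000) = 0 := by omega
      have d2 : ((n - 5) / 100 % 10) = 0 := by omega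
      have d2' : (n / 100 % 10) = 0 := by omega
      have d3 : ((n - 5) / 10 % 10) = 0 := by omega
      have d3' : (n / 10 % 10) = 0 := by omega
      have d4 : ((n - 5) % 10) = (n % 10) - 5 := by omega
      rw [d1, d1', d2, d2', d3, d3', d4, pvL0]
      have hh : (n % 10) = 5 ∨ (n % 10) = 6 ∨ (n % 10) = 7 ∨
          (n % 10) = 8 := by omega
      rcases hh with hh | hh | hh | hh <;>
        rw [hh] <;>
        simp [show ¬ (4000:Int) ≤ n from by omega, show ¬ (4000:Int) ≤ n - 5 from by omega,
          pvL0, pvL1, pvL2, pvL3, pvL5, pvL6, pvL7, pvL8] <;>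
        push_cast <;> ring
    case inr =>
    rcases pvGE n 4 with hb12 | hb12
    case inl => -- v = 4, 'IV' (n = 4)
      have hn4 : n = 4 := by omega
      subst hn4
      have hfind : pvTable.find? (fun p => decide (p.1 ≤ (4:Int))) = some (4, ['I','V']) := by
        decide
      rw [pvGreedy, if_pos hn, hfind]
      show ((pvGreedy f ((4:Int) - 4) (res ++ ['I','V'])).length : Int) = (res.length : Int) + pvT 4
      rw [show (4:Int) - 4 = 0 from by norm_num,
        ih 0 (res ++ ['I','V']) (by omega) (by omega) (by omega)]
      simp only [List.length_append, List.length_cons, List.length_nil]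
      show _ = (res.length : Int) + pvT 4
      unfold pvT
      rw [pvS_nonpos 0 (by omega), pvS_pos 4 (by omega),
        pvS_nonpos ((4 / 10)) (by omega)]
      norm_num [pvL4]
    case inr => -- v = 1, 'I' (1 ≤ n ≤ 3)
      have hfind : pvTable.find? (fun p => decide (p.1 ≤ n)) = some (1, ['I']) := by
        simp [pvTable, List.find?, show ¬ (1000:Int) ≤ n from by omega,
          show ¬ (900:Int) ≤ n from by omega, show ¬ (500:Int) ≤ n from by omega,
          show ¬ (400:Int) ≤ n from by omega, show ¬ (100:Int) ≤ n from by omega,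
          show ¬ (90:Int) ≤ n from by omega, show ¬ (50:Int) ≤ n from by omega,
          show ¬ (40:Int) ≤ n from by omega, show ¬ (10:Int) ≤ n from by omega,
          show ¬ (9:Int) ≤ n from by omega, show ¬ (5:Int) ≤ n from by omega,
          show ¬ (4:Int) ≤ n from by omega, show (1:Int) ≤ n from by omega]
      rw [pvGreedy, if_pos hn, hfind]
      rw [ih (n - 1) (res ++ ['I']) (by omega) (by omega) (by omega)]
      simp only [List.length_append, List.length_cons, List.length_nil]
      unfold pvT
      rw [pvS_digits n (by omega) (by omega), pvS_digits (n - 1) (by omega) (by omega)]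
      have d1 : ((n - 1) / 1000) = 0 := by omega
      have d1' : (n / 1000) = 0 := by omega
      have d2 : ((n - 1) / 100 % 10) = 0 := by omega
      have d2' : (n / 100 % 10) = 0 := by omega
      have d3 : ((n - 1) / 10 % 10) = 0 := by omega
      have d3' : (n / 10 % 10) = 0 := by omega
      have d4 : ((n - 1) % 10) = (n % 10) - 1 := by omega
      rw [d1, d1', d2, d2', d3, d3', d4, pvL0]
      have hh : (n % 10) = 1 ∨ (n % 10) = 2 ∨ (n % 10) = 3 := by omega
      rcases hh with hh | hh | hh <;>
        rw [hh] <;>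
        simp [show ¬ (4000:Int) ≤ n from by omega, show ¬ (4000:Int) ≤ n - 1 from by omega,
          pvL0, pvL1, pvL2, pvL3] <;>
        push_cast <;> ring

-- ===== VERDICT (by name: the statement is the Claim_ definition above) =====
theorem roman_numeral_len_spec : Claim_equal_roman_numeral_len := by
  intro n _ hpre
  obtain ⟨h2, h5⟩ := hpre
  unfold Spec_roman_numeral_len roman_numeral_len roman_numeral_len_alt
  rw [pvALoop_eq (n.toNat + 1) n _ (by omega),
    pvGreedy_eq (n.toNat + 1) n [] (by omega) (by omega) (by omega)]
  unfold pvT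
  simp only [List.length_nil]
  split_ifs with h h' h' <;> push_cast <;> ring_nf <;> omega
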